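-- pv_equiv track=rewrite | github.com/dsriva03/dsa-training | cvent_prac/first_valid_slice.py | first_valid_slice
-- ===== SOURCE A (Python) =====
-- def first_valid_slice(s):
--     curr = ""
--     has_num = False
--     has_al = False
--
--     for char in s:
--         if char.isalnum():
--             curr += char
--             if char.isalpha():
--                 has_al = True
--             if char.isdigit():
--                 has_num = True
--         else:
--             if has_al and has_num:
--                 return curr
--             else:
--                 curr = ""
--                 has_al = False
--                 has_num = False
--
--     if has_al and has_num:
--         return curr
--
--     return "NONE"
-- ===== SOURCE B (Python) =====
-- def first_valid_slice(s):
--     # blank out every non-alphanumeric char, split into the maximal alnum runs,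
--     # then return the first run containing both a letter and a digit
--     runs = "".join(c if c.isalnum() else " " for c in s).split()
--     for run in runs:
--         if any(c.isalpha() for c in run) and any(c.isdigit() for c in run):
--             return run
--     return "NONE"
-- ===== Notes on version B (the rewrite author's own statement) =====
-- stated objective: idiomatic
-- what changed: B first materialises the maximal alphanumeric runs (blank out non-alnum chars, split on whitespace) and then returns the first run passing per-run any(isalpha)/any(isdigit) tests, replacing A's single pass with running curr/has_al/has_num flags and early return.
import Mathlib
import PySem

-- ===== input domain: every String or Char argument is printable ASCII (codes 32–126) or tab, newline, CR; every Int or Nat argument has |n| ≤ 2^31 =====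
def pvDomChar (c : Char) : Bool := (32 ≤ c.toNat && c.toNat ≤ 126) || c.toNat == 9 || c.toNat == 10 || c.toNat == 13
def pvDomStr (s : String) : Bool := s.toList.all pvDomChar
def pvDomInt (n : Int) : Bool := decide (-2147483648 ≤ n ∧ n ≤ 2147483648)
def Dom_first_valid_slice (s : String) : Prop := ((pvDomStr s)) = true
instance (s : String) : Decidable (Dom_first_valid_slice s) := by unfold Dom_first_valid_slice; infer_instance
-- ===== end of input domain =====

-- B builds the list of maximal alnum runs first (blank-out + split) and then scans it with
-- per-run any() tests, instead of A's single pass with running has_al/has_num flags (objective: idiomatic).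

-- ===== PORT A =====
-- A's loop: state = (curr, has_al, has_num); early return on a separator when both flags hold.
def pvGoA : List Char → List Char → Bool → Bool → List Char
  | [], curr, ha, hn => if ha && hn then curr else ['N', 'O', 'N', 'E']
  | c :: rest, curr, ha, hn =>
    if PySem.Chars.isalnum c then
      pvGoA rest (curr ++ [c]) (if PySem.Chars.isalpha c then true else ha)
        (if PySem.Chars.isdigit c then true else hn)
    else
      if ha && hn then curr else pvGoA rest [] false false

def first_valid_slice (s : String) : String := String.ofList (pvGoA s.toList [] false false)

-- ===== PORT B =====
-- c if c.isalnum() else " "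
def pvBlank (c : Char) : Char := if PySem.Chars.isalnum c then c else ' '
-- any(c.isalpha() for c in run) and any(c.isdigit() for c in run)
def pvValid (r : List Char) : Bool := r.any PySem.Chars.isalpha && r.any PySem.Chars.isdigit

def first_valid_slice_alt (s : String) : String :=
  match (PySem.Chars.split₀ (s.toList.map pvBlank)).find? pvValid with
  | some r => String.ofList r
  | none => "NONE"

-- ===== PRECONDITION & SPEC =====
def Spec_first_valid_slice (s : String) (out : String) : Prop := out = first_valid_slice_alt s
instance (s : String) (out : String) : Decidable (Spec_first_valid_slice s out) := by unfold Spec_first_valid_slice; infer_instance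

-- ===== CLAIM (what is proved, stated in full; the proofs are below) =====
def Claim_equal_first_valid_slice : Prop := ∀ (s : String), Dom_first_valid_slice s → Spec_first_valid_slice s (first_valid_slice s)

-- ===== LEMMAS AND PROOFS =====

theorem pv_alnum_not_space (c : Char) (h : PySem.Chars.isalnum c = true) :
    PySem.Chars.isspace c = false := by
  simp only [PySem.Chars.isalnum, PySem.Chars.isalpha, PySem.Chars.isdigit,
    PySem.Chars.isupper, PySem.Chars.islower, Bool.or_eq_true, Bool.and_eq_true,
    decide_eq_true_eq, Char.le_def, UInt32.le_iff_toNat_le] at h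
  norm_num at h
  rw [(by decide : ('A' : Char).toNat = 65), (by decide : ('Z' : Char).toNat = 90),
      (by decide : ('a' : Char).toNat = 97), (by decide : ('z' : Char).toNat = 122),
      (by decide : ('0' : Char).toNat = 48), (by decide : ('9' : Char).toNat = 57)] at h
  simp only [PySem.Chars.isspace, Bool.or_eq_false_iff, Bool.and_eq_false_iff,
    decide_eq_false_iff_not]
  simp only [Char.toNat] at h ⊢
  omega

theorem pv_go_acc (xs cur acc) :
    PySem.Chars.split₀.go xs cur acc = acc.reverse ++ PySem.Chars.split₀.go xs cur [] := by
  induction xs generalizing cur acc with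
  | nil =>
    simp only [PySem.Chars.split₀.go]
    split_ifs <;> simp
  | cons c rest ih =>
    simp only [PySem.Chars.split₀.go]
    split_ifs with h1 h2
    · rw [ih [] acc]
    · rw [ih [] (cur.reverse :: acc), ih [] [cur.reverse]]
      simp
    · exact ih (c :: cur) acc

theorem pv_main (rest : List Char) (cur : List Char) (acc : List (List Char))
    (hacc : ∀ r ∈ acc, pvValid r = false) :
    pvGoA rest cur (cur.any PySem.Chars.isalpha) (cur.any PySem.Chars.isdigit)
      = (match (PySem.Chars.split₀.go (rest.map pvBlank) cur.reverse acc).find? pvValid with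
         | some r => r
         | none => ['N', 'O', 'N', 'E']) := by
  induction rest generalizing cur acc with
  | nil =>
    have hnone : acc.reverse.find? pvValid = none :=
      List.find?_eq_none.mpr (fun r hr => by simp [hacc r (List.mem_reverse.mp hr)])
    simp only [List.map_nil, PySem.Chars.split₀.go, pvGoA]
    by_cases hc : cur = []
    · subst hc; simp [hnone]
    · have : cur.reverse.isEmpty = false := by simp [hc]
      rw [this]
      simp only [Bool.false_eq_true, if_false, List.reverse_cons, List.reverse_reverse]
      rw [List.find?_append, hnone]
      by_cases hv : pvValid cur = true
      · have := hv; simp only [pvValid] at this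
        simp [hv, this]
      · have hv' : pvValid cur = false := by simpa using hv
        have := hv'; simp only [pvValid] at this
        simp [hv', this]
  | cons c rest ih =>
    simp only [List.map_cons, pvGoA]
    by_cases hal : PySem.Chars.isalnum c = true
    · have hsp : PySem.Chars.isspace c = false := pv_alnum_not_space c hal
      have hb : pvBlank c = c := by simp [pvBlank, hal]
      rw [hb]
      simp only [PySem.Chars.split₀.go, hsp, Bool.false_eq_true, if_false, hal, if_true]
      have e1 : (if PySem.Chars.isalpha c = true then true else cur.any PySem.Chars.isalpha)
          = (cur ++ [c]).any PySem.Chars.isalpha := by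
        cases h : PySem.Chars.isalpha c <;> simp [h]
      have e2 : (if PySem.Chars.isdigit c = true then true else cur.any PySem.Chars.isdigit)
          = (cur ++ [c]).any PySem.Chars.isdigit := by
        cases h : PySem.Chars.isdigit c <;> simp [h]
      rw [e1, e2, ih (cur ++ [c]) acc hacc]
      simp
    · have hal' : PySem.Chars.isalnum c = false := by simpa using hal
      have hb : pvBlank c = ' ' := by simp [pvBlank, hal']
      rw [hb]
      have hsp : PySem.Chars.isspace ' ' = true := by decide
      simp only [PySem.Chars.split₀.go, hsp, if_true, hal', Bool.false_eq_true, if_false]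
      by_cases hv : pvValid cur = true
      · -- A returns curr here; B's first passing run is exactly cur
        have hcne : cur ≠ [] := by
          intro h; rw [h] at hv; simp [pvValid] at hv
        have hre : cur.reverse.isEmpty = false := by simp [hcne]
        rw [hre]
        simp only [Bool.false_eq_true, if_false, List.reverse_reverse]
        rw [pv_go_acc _ [] (cur :: acc)]
        have hnone : acc.reverse.find? pvValid = none :=
          List.find?_eq_none.mpr (fun r hr => by simp [hacc r (List.mem_reverse.mp hr)])
        simp only [List.reverse_cons]
        rw [List.append_assoc, List.find?_append, hnone]
        have hvb := hv; simp only [pvValid] at hvb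
        simp [hv, hvb]
      · have hv' : pvValid cur = false := by simpa using hv
        have hvb : (cur.any PySem.Chars.isalpha && cur.any PySem.Chars.isdigit) = false := by
          simpa [pvValid] using hv'
        simp only [hvb, Bool.false_eq_true, if_false]
        by_cases hc : cur = []
        · subst hc
          simp only [List.reverse_nil, List.isEmpty_nil, if_true]
          exact ih [] acc hacc
        · have hre : cur.reverse.isEmpty = false := by simp [hc]
          rw [hre]
          simp only [Bool.false_eq_true, if_false, List.reverse_reverse]
          exact ih [] (cur :: acc) (by
            intro r hr
            rcases List.mem_cons.mp hr with h | h
            · subst h; exact hv'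
            · exact hacc r h)

-- ===== VERDICT (by name: the statement is the Claim_ definition above) =====
theorem first_valid_slice_spec : Claim_equal_first_valid_slice := by
  intro s _
  show first_valid_slice s = first_valid_slice_alt s
  unfold first_valid_slice first_valid_slice_alt PySem.Chars.split₀
  have h := pv_main s.toList [] [] (by intro r hr; cases hr)
  simp only [List.any_nil, List.reverse_nil] at h
  rw [h]
  cases hf : ((PySem.Chars.split₀.go (s.toList.map pvBlank) [] []).find? pvValid) with
  | none => rfl
  | some r => rfl
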